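-- pv_equiv track=rewrite | github.com/YashB63/GFG-Daily-Questions | Day 105/Permutation divisibility/permutation_divisibility.py | divisible_by_four
-- ===== SOURCE A (Python) =====
-- def divisible_by_four(s):
--
--     n = len(s)
--
--     if n == 1:
--         if (ord(s[0]) - ord("0")) % 4 == 0:
--             return 1
--         return 0
--
--     for i in range(n):
--         for j in range(i+1, n):
--             a = (ord(s[i]) - ord("0")) * 10 + (ord(s[j]) - ord("0"))
--             b = (ord(s[j]) - ord("0")) * 10 + (ord(s[i]) - ord("0"))
--
--             if a %4 == 0 or b %4 == 0:
--                 return 1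
--
--     return 0
-- ===== SOURCE B (Python) =====
-- def divisible_by_four(s):
--     if len(s) == 1:
--         return 1 if (ord(s[0]) - 48) % 4 == 0 else 0
--     # one pass: count characters by ord(c) % 4 -- only the residue mod 4 matters,
--     # since (x*10 + y) % 4 == (2*(x%4) + y%4) % 4 and 48 % 4 == 0
--     cnt = [0, 0, 0, 0]
--     for ch in s:
--         cnt[ord(ch) % 4] += 1
--     for r in range(4):
--         for t in range(4):
--             if (2 * r + t) % 4 == 0:
--                 if cnt[r] >= 2 if r == t else (cnt[r] >= 1 and cnt[t] >= 1):
--                     return 1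
--     return 0
-- ===== Notes on version B (the rewrite author's own statement) =====
-- stated objective: alternative
-- what changed: Replaced the scan over all index pairs by one counting pass over characters keyed by ord(c) % 4 (only the residue mod 4 matters since (x*10+y) % 4 == (2x+y) % 4 and 48 % 4 == 0), followed by a constant-size check of the 16 residue pairs.
import Mathlib
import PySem

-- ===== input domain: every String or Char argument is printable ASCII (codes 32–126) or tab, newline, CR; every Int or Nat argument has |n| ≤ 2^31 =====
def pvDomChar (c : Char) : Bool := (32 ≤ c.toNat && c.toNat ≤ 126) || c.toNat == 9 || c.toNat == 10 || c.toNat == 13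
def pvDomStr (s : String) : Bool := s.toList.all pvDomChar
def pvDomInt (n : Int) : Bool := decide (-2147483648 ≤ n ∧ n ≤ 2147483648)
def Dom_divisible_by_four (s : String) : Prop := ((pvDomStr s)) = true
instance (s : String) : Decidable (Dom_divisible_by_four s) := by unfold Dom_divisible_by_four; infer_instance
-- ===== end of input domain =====

-- B replaces A's scan over all index pairs by one counting pass over the residues
-- ord(c) mod 4 plus a constant-size check of the residue pairs (objective: alternative).

-- ===== PORT A =====
-- literal port of A (locals n, a, b inlined/kept): the n == 1 special case, then the double
-- loop over index pairs with its early 'return 1' rendered as List.any over the same ranges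
def divisible_by_four (s : String) : Int :=
  if s.toList.length == 1 then
    if ((Int.ofNat (PySem.List.pyGetD s.toList 0 ' ').toNat - 48) % 4 == 0) then 1 else 0
  else
    if (PySem.List.pyRange 0 (s.toList.length : Int) 1).any (fun i =>
        (PySem.List.pyRange (i + 1) (s.toList.length : Int) 1).any (fun j =>
          let a := (Int.ofNat (PySem.List.pyGetD s.toList i ' ').toNat - 48) * 10 +
                   (Int.ofNat (PySem.List.pyGetD s.toList j ' ').toNat - 48)
          let b := (Int.ofNat (PySem.List.pyGetD s.toList j ' ').toNat - 48) * 10 +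
                   (Int.ofNat (PySem.List.pyGetD s.toList i ' ').toNat - 48)
          (a % 4 == 0) || (b % 4 == 0)))
    then 1 else 0

-- ===== PORT B =====
-- Source B's cnt = [0,0,0,0] list as a 4-tuple, updated in one fold over the characters
def pvCntStep (c : Nat × Nat × Nat × Nat) (ch : Char) : Nat × Nat × Nat × Nat :=
  match ch.toNat % 4 with
  | 0 => (c.1 + 1, c.2.1, c.2.2.1, c.2.2.2)
  | 1 => (c.1, c.2.1 + 1, c.2.2.1, c.2.2.2)
  | 2 => (c.1, c.2.1, c.2.2.1 + 1, c.2.2.2)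
  | _ => (c.1, c.2.1, c.2.2.1, c.2.2.2 + 1)

-- cnt[r] for the indices r produced by range(4)
def pvCntGet (c : Nat × Nat × Nat × Nat) (r : Int) : Nat :=
  if r = 0 then c.1 else if r = 1 then c.2.1 else if r = 2 then c.2.2.1 else c.2.2.2

def divisible_by_four_alt (s : String) : Int :=
  if s.toList.length == 1 then
    if ((Int.ofNat (PySem.List.pyGetD s.toList 0 ' ').toNat - 48) % 4 == 0) then 1 else 0
  else
    if (PySem.List.pyRange 0 4 1).any (fun r =>
        (PySem.List.pyRange 0 4 1).any (fun t =>
          ((2 * r + t) % 4 == 0) &&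
          (if r == t then decide (2 ≤ pvCntGet (s.toList.foldl pvCntStep (0, 0, 0, 0)) r)
           else decide (1 ≤ pvCntGet (s.toList.foldl pvCntStep (0, 0, 0, 0)) r) &&
                decide (1 ≤ pvCntGet (s.toList.foldl pvCntStep (0, 0, 0, 0)) t))))
    then 1 else 0

-- ===== PRECONDITION & SPEC =====
def Spec_divisible_by_four (s : String) (out : Int) : Prop := out = divisible_by_four_alt s
instance (s : String) (out : Int) : Decidable (Spec_divisible_by_four s out) := by unfold Spec_divisible_by_four; infer_instance

-- ===== CLAIM (what is proved, stated in full; the proofs are below) =====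
def Claim_equal_divisible_by_four : Prop := ∀ (s : String), Dom_divisible_by_four s → Spec_divisible_by_four s (divisible_by_four s)

-- ===== LEMMAS AND PROOFS =====

-- residue of a character
def pvRes (c : Char) : Nat := c.toNat % 4

-- A's pair test, as a Bool on the two characters
def pvOk (x y : Char) : Bool :=
  (((Int.ofNat x.toNat - 48) * 10 + (Int.ofNat y.toNat - 48)) % 4 == 0) ||
  (((Int.ofNat y.toNat - 48) * 10 + (Int.ofNat x.toNat - 48)) % 4 == 0)

-- "some index pair passes A's test"
def pvPairEx (l : List Char) : Prop :=
  ∃ i j : Nat, ∃ hj : j < l.length, ∃ hij : i < j, pvOk (l[i]'(by omega)) l[j] = true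

-- the residue-count condition B checks
def pvGood (l : List Char) : Prop :=
  2 ≤ l.countP (fun c => pvRes c == 0) ∨
  (1 ≤ l.countP (fun c => pvRes c == 1) ∧ 1 ≤ l.countP (fun c => pvRes c == 2)) ∨
  (1 ≤ l.countP (fun c => pvRes c == 2) ∧ 1 ≤ l.countP (fun c => pvRes c == 0)) ∨
  (1 ≤ l.countP (fun c => pvRes c == 3) ∧ 1 ≤ l.countP (fun c => pvRes c == 2))

lemma pvOk_iff (x y : Char) :
    pvOk x y = true ↔
      (2 * pvRes x + pvRes y) % 4 = 0 ∨ (2 * pvRes y + pvRes x) % 4 = 0 := by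
  simp only [pvOk, pvRes, Bool.or_eq_true, beq_iff_eq, Int.ofNat_eq_natCast]
  omega

lemma pvCnt_fold (l : List Char) (c0 c1 c2 c3 : Nat) :
    l.foldl pvCntStep (c0, c1, c2, c3) =
      (c0 + l.countP (fun c => pvRes c == 0),
       c1 + l.countP (fun c => pvRes c == 1),
       c2 + l.countP (fun c => pvRes c == 2),
       c3 + l.countP (fun c => pvRes c == 3)) := by
  induction l generalizing c0 c1 c2 c3 with
  | nil => simp
  | cons x xs ih =>
    have hx : x.toNat % 4 = 0 ∨ x.toNat % 4 = 1 ∨ x.toNat % 4 = 2 ∨ x.toNat % 4 = 3 := by omega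
    rcases hx with h | h | h | h <;>
      simp [List.foldl_cons, pvCntStep, h, ih, pvRes] <;> omega

-- two indexed hits give count ≥ 2
lemma countP_two_of_idx (l : List Char) (p : Char → Bool) (i j : Nat)
    (hj : j < l.length) (hij : i < j)
    (h1 : p (l[i]'(by omega)) = true) (h2 : p l[j] = true) :
    2 ≤ l.countP p := by
  induction l generalizing i j with
  | nil => simp at hj
  | cons x xs ih =>
    rcases i with _ | i
    · rcases j with _ | j
      · omega
      · simp only [List.getElem_cons_zero] at h1
        simp only [List.getElem_cons_succ] at h2
        have hpos : 0 < xs.countP p :=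
          List.countP_pos_iff.2 ⟨xs[j]'(by simpa using hj), List.getElem_mem _, h2⟩
        rw [List.countP_cons, if_pos h1]
        omega
    · rcases j with _ | j
      · omega
      · simp only [List.getElem_cons_succ] at h1 h2
        have := ih i j (by simpa using hj) (by omega) h1 h2
        rw [List.countP_cons]
        omega

-- count ≥ 2 gives two indexed hits
lemma idx_of_countP_two (l : List Char) (p : Char → Bool) (h : 2 ≤ l.countP p) :
    ∃ i j : Nat, ∃ hj : j < l.length, ∃ hij : i < j,
      p (l[i]'(by omega)) = true ∧ p l[j] = true := by
  induction l with
  | nil => simp at h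
  | cons x xs ih =>
    rw [List.countP_cons] at h
    by_cases hx : p x = true
    · rw [if_pos hx] at h
      obtain ⟨y, hy, hpy⟩ := List.countP_pos_iff.1 (by omega : 0 < xs.countP p)
      obtain ⟨k, hk, hky⟩ := List.mem_iff_getElem.1 hy
      exact ⟨0, k + 1, by simpa using hk, by omega, by simpa using hx, by simpa [hky]⟩
    · rw [if_neg hx] at h
      obtain ⟨i, j, hj, hij, h1, h2⟩ := ih (by omega)
      exact ⟨i + 1, j + 1, by simpa using hj, by omega, by simpa using h1, by simpa using h2⟩

-- one hit gives an index
lemma idx_of_countP_one (l : List Char) (p : Char → Bool) (h : 1 ≤ l.countP p) :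
    ∃ i : Nat, ∃ hi : i < l.length, p l[i] = true := by
  obtain ⟨y, hy, hpy⟩ := List.countP_pos_iff.1 (show 0 < l.countP p by omega)
  obtain ⟨k, hk, hky⟩ := List.mem_iff_getElem.1 hy
  exact ⟨k, hk, by simpa [hky]⟩

-- two hits of distinct residues give a pair of positions passing A's test
lemma pairEx_of_two_res (l : List Char) (r t : Nat) (hrt : r ≠ t)
    (h1 : 1 ≤ l.countP (fun c => pvRes c == r)) (h2 : 1 ≤ l.countP (fun c => pvRes c == t))
    (hgood : (2 * r + t) % 4 = 0 ∨ (2 * t + r) % 4 = 0) : pvPairEx l := by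
  obtain ⟨a, ha, hpa⟩ := idx_of_countP_one l _ h1
  obtain ⟨b, hb, hpb⟩ := idx_of_countP_one l _ h2
  simp only [beq_iff_eq] at hpa hpb
  have hab : a ≠ b := by
    intro h
    subst h
    have : r = t := by rw [← hpa, ← hpb]
    exact hrt this
  rcases Nat.lt_or_ge a b with hlt | hge
  · exact ⟨a, b, hb, hlt, (pvOk_iff _ _).2 (by rw [hpa, hpb]; tauto)⟩
  · have hlt : b < a := by omega
    exact ⟨b, a, ha, hlt, (pvOk_iff _ _).2 (by rw [hpa, hpb]; tauto)⟩

lemma pairEx_iff_good (l : List Char) : pvPairEx l ↔ pvGood l := by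
  constructor
  · rintro ⟨i, j, hj, hij, hok⟩
    have hi : i < l.length := by omega
    rw [pvOk_iff] at hok
    have hcx : 1 ≤ l.countP (fun c => pvRes c == pvRes (l[i]'hi)) :=
      List.countP_pos_iff.2 ⟨l[i]'hi, List.getElem_mem _, by simp⟩
    have hcy : 1 ≤ l.countP (fun c => pvRes c == pvRes l[j]) :=
      List.countP_pos_iff.2 ⟨l[j], List.getElem_mem _, by simp⟩
    have hcxy : pvRes (l[i]'hi) = pvRes l[j] →
        2 ≤ l.countP (fun c => pvRes c == pvRes (l[i]'hi)) := fun h =>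
      countP_two_of_idx l _ i j hj hij (by simp) (by simp [h])
    have hxlt : pvRes (l[i]'hi) < 4 := Nat.mod_lt _ (by norm_num)
    have hylt : pvRes l[j] < 4 := Nat.mod_lt _ (by norm_num)
    unfold pvGood
    generalize hgx : pvRes (l[i]'hi) = rx at hok hcx hcxy hxlt
    generalize hgy : pvRes l[j] = ry at hok hcy hcxy hylt
    interval_cases rx <;> interval_cases ry <;> simp_all
  · intro hg
    rcases hg with h | ⟨h1, h2⟩ | ⟨h1, h2⟩ | ⟨h1, h2⟩
    · obtain ⟨i, j, hj, hij, hp1, hp2⟩ := idx_of_countP_two l _ h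
      simp only [beq_iff_eq] at hp1 hp2
      exact ⟨i, j, hj, hij, (pvOk_iff _ _).2 (by rw [hp1, hp2]; omega)⟩
    · exact pairEx_of_two_res l 1 2 (by omega) h1 h2 (by omega)
    · exact pairEx_of_two_res l 2 0 (by omega) h1 h2 (by omega)
    · exact pairEx_of_two_res l 3 2 (by omega) h1 h2 (by omega)

-- A's double loop succeeds iff some index pair passes
lemma A_any_iff (l : List Char) :
    ((PySem.List.pyRange 0 (l.length : Int) 1).any (fun i =>
        (PySem.List.pyRange (i + 1) (l.length : Int) 1).any (fun j =>
          let a := (Int.ofNat (PySem.List.pyGetD l i ' ').toNat - 48) * 10 +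
                   (Int.ofNat (PySem.List.pyGetD l j ' ').toNat - 48)
          let b := (Int.ofNat (PySem.List.pyGetD l j ' ').toNat - 48) * 10 +
                   (Int.ofNat (PySem.List.pyGetD l i ' ').toNat - 48)
          (a % 4 == 0) || (b % 4 == 0))) = true) ↔ pvPairEx l := by
  simp only [List.any_eq_true, PySem.List.mem_pyRange_one]
  constructor
  · rintro ⟨i, ⟨hi0, hin⟩, j, ⟨hji, hjn⟩, hok⟩
    have hj0 : 0 ≤ j := by omega
    have hjl : j.toNat < l.length := by omega
    have hil : i.toNat < j.toNat := by omega
    refine ⟨i.toNat, j.toNat, hjl, hil, ?_⟩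
    rw [PySem.List.pyGetD_eq_getElem l ' ' hi0 hin, PySem.List.pyGetD_eq_getElem l ' ' hj0 hjn] at hok
    simpa [pvOk] using hok
  · rintro ⟨i, j, hj, hij, hok⟩
    refine ⟨(i : Int), ⟨by omega, by exact_mod_cast (by omega : i < l.length)⟩,
            (j : Int), ⟨by omega, by exact_mod_cast hj⟩, ?_⟩
    rw [PySem.List.pyGetD_eq_getElem l ' ' (by omega) (by exact_mod_cast (by omega : i < l.length)),
        PySem.List.pyGetD_eq_getElem l ' ' (by omega) (by exact_mod_cast hj)]
    simpa [pvOk] using hok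

-- B's residue-table scan succeeds iff the counts are good
lemma B_any_iff (l : List Char) :
    ((PySem.List.pyRange 0 4 1).any (fun r =>
        (PySem.List.pyRange 0 4 1).any (fun t =>
          ((2 * r + t) % 4 == 0) &&
          (if r == t then decide (2 ≤ pvCntGet (l.foldl pvCntStep (0, 0, 0, 0)) r)
           else decide (1 ≤ pvCntGet (l.foldl pvCntStep (0, 0, 0, 0)) r) &&
                decide (1 ≤ pvCntGet (l.foldl pvCntStep (0, 0, 0, 0)) t)))) = true)
      ↔ pvGood l := by
  have hr : PySem.List.pyRange 0 4 1 = [0, 1, 2, 3] := by decide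
  rw [pvCnt_fold l 0 0 0 0, hr]
  simp [pvCntGet, pvGood]

-- ===== VERDICT (by name: the statement is the Claim_ definition above) =====
theorem divisible_by_four_spec : Claim_equal_divisible_by_four := by
  intro s _
  unfold Spec_divisible_by_four divisible_by_four divisible_by_four_alt
  by_cases h1 : (s.toList.length == 1) = true
  · rw [if_pos h1, if_pos h1]
  · rw [if_neg h1, if_neg h1]
    by_cases hA : (PySem.List.pyRange 0 (s.toList.length : Int) 1).any (fun i =>
        (PySem.List.pyRange (i + 1) (s.toList.length : Int) 1).any (fun j =>
          let a := (Int.ofNat (PySem.List.pyGetD s.toList i ' ').toNat - 48) * 10 +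
                   (Int.ofNat (PySem.List.pyGetD s.toList j ' ').toNat - 48)
          let b := (Int.ofNat (PySem.List.pyGetD s.toList j ' ').toNat - 48) * 10 +
                   (Int.ofNat (PySem.List.pyGetD s.toList i ' ').toNat - 48)
          (a % 4 == 0) || (b % 4 == 0))) = true
    · have hB := (B_any_iff s.toList).2 ((pairEx_iff_good s.toList).1 ((A_any_iff s.toList).1 hA))
      rw [if_pos hA, if_pos hB]
    · have hB : ¬ ((PySem.List.pyRange 0 4 1).any (fun r =>
          (PySem.List.pyRange 0 4 1).any (fun t =>
            ((2 * r + t) % 4 == 0) &&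
            (if r == t then decide (2 ≤ pvCntGet (s.toList.foldl pvCntStep (0, 0, 0, 0)) r)
             else decide (1 ≤ pvCntGet (s.toList.foldl pvCntStep (0, 0, 0, 0)) r) &&
                  decide (1 ≤ pvCntGet (s.toList.foldl pvCntStep (0, 0, 0, 0)) t)))) = true) :=
        fun h => hA ((A_any_iff s.toList).2 ((pairEx_iff_good s.toList).2 ((B_any_iff s.toList).1 h)))
      rw [if_neg hA, if_neg hB]
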